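-- pv_equiv track=rewrite | github.com/Hou-Xiaoxuan/RFID_FMS | pysrc/core_v.py | find_dec
-- ===== SOURCE A (Python) =====
-- def find_dec(k):
--     l_tmp, r_tmp = 0, 0
--     l, r = [], []
--     state = 0
--     for i in range(0, len(k) - 1, 1):
--         if state == 0:
--             if k[i] > k[i + 1]:
--                 state = 1
--                 l_tmp = i
--         elif state == 1:
--             if k[i] < k[i + 1]:
--                 state = 0
--                 r_tmp = i + 1
--                 if r_tmp - l_tmp > 15:
--                     l.append(l_tmp)
--                     r.append(r_tmp)
--     return l, r
-- ===== SOURCE B (Python) =====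
-- def find_dec(k):
--     # staged passes: precompute comparison signs, collect the '>' and '<' index
--     # lists, then pair runs by a two-pointer merge of the two ascending lists
--     s = ['>' if a > b else ('<' if a < b else '=') for a, b in zip(k, k[1:])]
--     gt = [i for i, c in enumerate(s) if c == '>']
--     lt = [i for i, c in enumerate(s) if c == '<']
--     l, r = [], []
--     gi = 0
--     for t in lt:
--         if gi < len(gt) and gt[gi] <= t:
--             start = gt[gi]
--             if t + 1 - start > 15:
--                 l.append(start)
--                 r.append(t + 1)
--             while gi < len(gt) and gt[gi] <= t:
--                 gi += 1
--     return l, r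
-- ===== Notes on version B (the rewrite author's own statement) =====
-- stated objective: alternative
-- what changed: Replaces the per-element two-state machine by staged passes: precompute the comparison-sign list, extract the ascending index lists of '>' and '<' signs, and pair runs with a two-pointer merge of those two lists.
import Mathlib
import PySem

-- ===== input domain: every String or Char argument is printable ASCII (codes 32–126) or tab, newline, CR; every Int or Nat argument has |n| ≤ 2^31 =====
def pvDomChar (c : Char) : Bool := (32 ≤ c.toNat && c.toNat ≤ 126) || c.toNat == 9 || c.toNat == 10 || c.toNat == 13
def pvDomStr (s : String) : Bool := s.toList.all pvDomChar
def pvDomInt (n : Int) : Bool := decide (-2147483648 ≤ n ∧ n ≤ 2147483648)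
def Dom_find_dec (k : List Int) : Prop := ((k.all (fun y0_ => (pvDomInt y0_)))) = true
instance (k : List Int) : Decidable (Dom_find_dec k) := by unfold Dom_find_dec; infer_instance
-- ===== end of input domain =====

-- B replaces A's per-element two-state machine by staged passes: a comparison-sign
-- list, the index lists of '>' and '<' signs, and a two-pointer merge of those lists.

-- ===== PORT A =====
-- literal transliteration of A's loop: state tuple (l_tmp, r_tmp, l, r, state)
def find_dec (k : List Int) : List Int × List Int :=
  let st := (PySem.List.pyRange 0 (PySem.List.len k - 1) 1).foldl
    (fun (acc : Int × Int × List Int × List Int × Int) i =>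
      let (lt, rt, l, r, state) := acc
      if state = 0 then
        if PySem.List.pyGetD k i 0 > PySem.List.pyGetD k (i + 1) 0 then
          (i, rt, l, r, 1)
        else acc
      else if state = 1 then
        if PySem.List.pyGetD k i 0 < PySem.List.pyGetD k (i + 1) 0 then
          let rt' := i + 1
          if rt' - lt > 15 then (lt, rt', l ++ [lt], r ++ [rt'], 0)
          else (lt, rt', l, r, 0)
        else acc
      else acc)
    (0, 0, [], [], 0)
  (st.2.2.1, st.2.2.2.1)

-- ===== PORT B =====
-- helper for Source B's inner `while gi < len(gt) and gt[gi] <= t: gi += 1`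
def skipLE (gt : List Int) (gi : Nat) (t : Int) : Nat :=
  if h : gi < gt.length then
    if gt[gi] ≤ t then skipLE gt (gi + 1) t else gi
  else gi
termination_by gt.length - gi

def find_dec_alt (k : List Int) : List Int × List Int :=
  let s := (k.zip (k.drop 1)).map
    (fun p => if p.1 > p.2 then '>' else if p.1 < p.2 then '<' else '=')
  let gt := ((PySem.List.enumerate s 0).filter (fun p => p.2 == '>')).map Prod.fst
  let lt := ((PySem.List.enumerate s 0).filter (fun p => p.2 == '<')).map Prod.fst
  let res := lt.foldl
    (fun (acc : Nat × List Int × List Int) t =>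
      let (gi, l, r) := acc
      if gi < gt.length ∧ gt.getD gi 0 ≤ t then
        let start := gt.getD gi 0
        if t + 1 - start > 15 then (skipLE gt gi t, l ++ [start], r ++ [t + 1])
        else (skipLE gt gi t, l, r)
      else acc)
    (0, [], [])
  (res.2.1, res.2.2)

-- ===== PRECONDITION & SPEC =====
def Spec_find_dec (k : List Int) (out : List Int × List Int) : Prop := out = find_dec_alt k
instance (k : List Int) (out : List Int × List Int) : Decidable (Spec_find_dec k out) := by unfold Spec_find_dec; infer_instance

-- ===== CLAIM (what is proved, stated in full; the proofs are below) =====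
def Claim_equal_find_dec : Prop := ∀ (k : List Int), Dom_find_dec k → Spec_find_dec k (find_dec k)

-- ===== LEMMAS AND PROOFS =====

-- the comparison-sign list both programs are about
def sgn (a b : Int) : Char := if a > b then '>' else if a < b then '<' else '='
def sgs (k : List Int) : List Char := (k.zip (k.drop 1)).map (fun p => sgn p.1 p.2)

-- absolute index lists of '>' and '<' signs in a sign list starting at position i
def gtOf : List Char → Int → List Int
  | [], _ => []
  | c :: s, i => if c = '>' then i :: gtOf s (i + 1) else gtOf s (i + 1)
def ltOf : List Char → Int → List Int
  | [], _ => []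
  | c :: s, i => if c = '<' then i :: ltOf s (i + 1) else ltOf s (i + 1)

-- A's loop body on the sign character, and A's loop as structural recursion over the signs
def stepA (acc : Int × Int × List Int × List Int × Int) (c : Char) (i : Int) :
    Int × Int × List Int × List Int × Int :=
  let (lt, rt, l, r, state) := acc
  if state = 0 then
    if c = '>' then (i, rt, l, r, 1) else acc
  else if state = 1 then
    if c = '<' then
      if i + 1 - lt > 15 then (lt, i + 1, l ++ [lt], r ++ [i + 1], 0)
      else (lt, i + 1, l, r, 0)
    else acc
  else acc

def runA : List Char → Int → (Int × Int × List Int × List Int × Int) →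
    Int × Int × List Int × List Int × Int
  | [], _, acc => acc
  | c :: s, i, acc => runA s (i + 1) (stepA acc c i)

-- verbatim copies of the two loop bodies (definitionally equal to the port lambdas)
def fK (k : List Int) (acc : Int × Int × List Int × List Int × Int) (i : Int) :
    Int × Int × List Int × List Int × Int :=
  let (lt, rt, l, r, state) := acc
  if state = 0 then
    if PySem.List.pyGetD k i 0 > PySem.List.pyGetD k (i + 1) 0 then
      (i, rt, l, r, 1)
    else acc
  else if state = 1 then
    if PySem.List.pyGetD k i 0 < PySem.List.pyGetD k (i + 1) 0 then
      let rt' := i + 1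
      if rt' - lt > 15 then (lt, rt', l ++ [lt], r ++ [rt'], 0)
      else (lt, rt', l, r, 0)
    else acc
  else acc

def bstep (gt : List Int) (acc : Nat × List Int × List Int) (t : Int) :
    Nat × List Int × List Int :=
  let (gi, l, r) := acc
  if gi < gt.length ∧ gt.getD gi 0 ≤ t then
    let start := gt.getD gi 0
    if t + 1 - start > 15 then (skipLE gt gi t, l ++ [start], r ++ [t + 1])
    else (skipLE gt gi t, l, r)
  else acc

-- recursive form of B's two-pointer merge (structural on the '<' list)
def mergeRec : List Int → List Int → List Int → List Int → List Int × List Int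
  | _, [], l, r => (l, r)
  | [], _ :: lt', l, r => mergeRec [] lt' l r
  | g :: gt', t :: lt', l, r =>
    if g ≤ t then
      if t + 1 - g > 15 then
        mergeRec ((g :: gt').dropWhile (· ≤ t)) lt' (l ++ [g]) (r ++ [t + 1])
      else
        mergeRec ((g :: gt').dropWhile (· ≤ t)) lt' l r
    else mergeRec (g :: gt') lt' l r
termination_by _ lt => lt.length

theorem mem_gtOf {s : List Char} {i x : Int} (h : x ∈ gtOf s i) : i ≤ x := by
  induction s generalizing i with
  | nil => simp [gtOf] at h
  | cons c s ih =>
    by_cases hc : c = '>' <;> simp [gtOf, hc] at h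
    · rcases h with h | h
      · omega
      · have := ih h; omega
    · have := ih h; omega

theorem mem_ltOf {s : List Char} {i x : Int} (h : x ∈ ltOf s i) : i ≤ x := by
  induction s generalizing i with
  | nil => simp [ltOf] at h
  | cons c s ih =>
    by_cases hc : c = '<' <;> simp [ltOf, hc] at h
    · rcases h with h | h
      · omega
      · have := ih h; omega
    · have := ih h; omega

theorem dropWhile_of_all {gt : List Int} {t : Int} (h : ∀ x ∈ gt, t < x) :
    gt.dropWhile (· ≤ t) = gt := by
  cases gt with
  | nil => rfl
  | cons g gt' =>
    have : ¬ g ≤ t := by have := h g (by simp); omega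
    simp [this]

-- pending-run continuation of the merge (state 1 of A, started at g)
def closeRun (g : Int) (gt lt : List Int) (l r : List Int) : List Int × List Int :=
  match lt with
  | [] => (l, r)
  | t :: lt' =>
    if t + 1 - g > 15 then
      mergeRec (gt.dropWhile (· ≤ t)) lt' (l ++ [g]) (r ++ [t + 1])
    else mergeRec (gt.dropWhile (· ≤ t)) lt' l r

-- mergeRec with a '>' at the head that precedes every remaining '<'
theorem mergeRec_cons_head {i : Int} {gt lt : List Int} (hlt : ∀ t ∈ lt, i < t)
    (l r : List Int) : mergeRec (i :: gt) lt l r = closeRun i gt lt l r := by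
  cases lt with
  | nil => simp [mergeRec, closeRun]
  | cons t lt' =>
    have hit : i ≤ t := by have := hlt t (by simp); omega
    simp only [mergeRec, closeRun]
    rw [if_pos hit]
    simp only [List.dropWhile_cons]
    simp [hit]

-- skipping a '<' that no remaining '>' can open
theorem mergeRec_skip_lt {i : Int} {gt lt' : List Int} (hgt : ∀ x ∈ gt, i < x)
    (l r : List Int) : mergeRec gt (i :: lt') l r = mergeRec gt lt' l r := by
  cases gt with
  | nil => simp [mergeRec]
  | cons g gt' =>
    have : ¬ g ≤ i := by have := hgt g (by simp); omega
    simp [mergeRec, this]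

-- the central invariant: A's state machine equals the two-pointer merge
theorem runA_eq_mergeRec (s : List Char) :
    (∀ (i lt rt : Int) (l r : List Int),
        ((runA s i (lt, rt, l, r, 0)).2.2.1, (runA s i (lt, rt, l, r, 0)).2.2.2.1) =
          mergeRec (gtOf s i) (ltOf s i) l r) ∧
    (∀ (i g rt : Int) (l r : List Int),
        ((runA s i (g, rt, l, r, 1)).2.2.1, (runA s i (g, rt, l, r, 1)).2.2.2.1) =
          closeRun g (gtOf s i) (ltOf s i) l r) := by
  induction s with
  | nil =>
    constructor
    · intro i lt rt l r
      simp [runA, gtOf, ltOf, mergeRec]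
    · intro i g rt l r
      simp [runA, gtOf, ltOf, closeRun]
  | cons c s ih =>
    obtain ⟨ih0, ih1⟩ := ih
    constructor
    · intro i lt rt l r
      by_cases hgt : c = '>'
      · subst hgt
        have h1 : ∀ t ∈ ltOf s (i + 1), i < t := fun t ht => by
          have := mem_ltOf ht; omega
        simp only [runA, stepA, gtOf, ltOf, reduceIte,
          if_pos (show ('>' : Char) = '>' from rfl),
          if_neg (show ¬ ('>' : Char) = '<' from by decide),
          if_neg (show ¬ (1 : Int) = 0 from by decide),
          if_pos (show (0 : Int) = 0 from rfl), if_true]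
        rw [ih1 (i + 1) i rt l r, mergeRec_cons_head h1 l r]
      · by_cases hlt : c = '<'
        · subst hlt
          have h1 : ∀ x ∈ gtOf s (i + 1), i < x := fun x hx => by
            have := mem_gtOf hx; omega
          simp only [runA, stepA, gtOf, ltOf, reduceIte,
            if_pos (show ('<' : Char) = '<' from rfl),
            if_neg (show ¬ ('<' : Char) = '>' from by decide),
            if_neg (show ¬ (1 : Int) = 0 from by decide),
            if_pos (show (0 : Int) = 0 from rfl), if_true]
          rw [ih0 (i + 1) lt rt l r, mergeRec_skip_lt h1 l r]
        · simp only [runA, stepA, gtOf, ltOf, if_neg hgt, if_neg hlt, reduceIte,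
            if_neg (show ¬ (1 : Int) = 0 from by decide),
            if_pos (show (0 : Int) = 0 from rfl), if_true]
          exact ih0 (i + 1) lt rt l r
    · intro i g rt l r
      by_cases hlt : c = '<'
      · subst hlt
        have hall : ∀ x ∈ gtOf s (i + 1), i < x := fun x hx => by
          have := mem_gtOf hx; omega
        have hdw : (gtOf s (i + 1)).dropWhile (· ≤ i) = gtOf s (i + 1) :=
          dropWhile_of_all hall
        by_cases hth : i + 1 - g > 15
        · simp only [runA, stepA, gtOf, ltOf, closeRun, reduceIte, if_pos hth,
            if_pos (show ('<' : Char) = '<' from rfl),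
            if_neg (show ¬ ('<' : Char) = '>' from by decide),
            if_neg (show ¬ (1 : Int) = 0 from by decide),
            if_pos (show (1 : Int) = 1 from rfl), if_true]
          rw [ih0 (i + 1) g (i + 1) (l ++ [g]) (r ++ [i + 1]), hdw]
        · simp only [runA, stepA, gtOf, ltOf, closeRun, reduceIte, if_neg hth,
            if_pos (show ('<' : Char) = '<' from rfl),
            if_neg (show ¬ ('<' : Char) = '>' from by decide),
            if_neg (show ¬ (1 : Int) = 0 from by decide),
            if_pos (show (1 : Int) = 1 from rfl), if_true]
          rw [ih0 (i + 1) g (i + 1) l r, hdw]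
      · by_cases hgt : c = '>'
        · subst hgt
          simp only [runA, stepA, gtOf, ltOf, reduceIte,
            if_pos (show ('>' : Char) = '>' from rfl),
            if_neg (show ¬ ('>' : Char) = '<' from by decide),
            if_neg (show ¬ (1 : Int) = 0 from by decide),
            if_pos (show (1 : Int) = 1 from rfl), if_true]
          rw [ih1 (i + 1) g rt l r]
          cases hL : ltOf s (i + 1) with
          | nil => simp [closeRun]
          | cons t lt' =>
            have hit : i ≤ t := by
              have : t ∈ ltOf s (i + 1) := by rw [hL]; simp
              have := mem_ltOf this; omega
            have hd : (i :: gtOf s (i + 1)).dropWhile (· ≤ t) =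
                (gtOf s (i + 1)).dropWhile (· ≤ t) := by
              rw [List.dropWhile_cons, if_pos (by simp [hit])]
            simp only [closeRun, hd]
        · simp only [runA, stepA, gtOf, ltOf, if_neg hgt, if_neg hlt, reduceIte,
            if_neg (show ¬ (1 : Int) = 0 from by decide),
            if_pos (show (1 : Int) = 1 from rfl), if_true]
          exact ih1 (i + 1) g rt l r

-- B's pointer loop: skipping equals dropWhile on the dropped suffix
theorem skip_drop (gt : List Int) (t : Int) :
    ∀ gi, gt.drop (skipLE gt gi t) = (gt.drop gi).dropWhile (· ≤ t) := by
  have main : ∀ n gi, gt.length - gi ≤ n →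
      gt.drop (skipLE gt gi t) = (gt.drop gi).dropWhile (· ≤ t) := by
    intro n
    induction n with
    | zero =>
      intro gi h
      have hge : gt.length ≤ gi := by omega
      rw [skipLE]
      simp [Nat.not_lt.mpr hge, List.drop_eq_nil_of_le hge]
    | succ n ihn =>
      intro gi h
      rw [skipLE]
      by_cases hlen : gi < gt.length
      · have hdrop : gt.drop gi = gt[gi] :: gt.drop (gi + 1) :=
          (List.getElem_cons_drop hlen).symm
        by_cases hle : gt[gi] ≤ t
        · rw [dif_pos hlen, if_pos hle, ihn (gi + 1) (by omega), hdrop,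
              List.dropWhile_cons, if_pos (by simp [hle])]
        · rw [dif_pos hlen, if_neg hle, hdrop, List.dropWhile_cons,
              if_neg (by simp [hle])]
      · have hge : gt.length ≤ gi := by omega
        simp [hlen, List.drop_eq_nil_of_le hge]
  exact fun gi => main (gt.length - gi) gi le_rfl

-- B's pointer loop equals the recursive merge
theorem foldl_bstep_eq_mergeRec (gt : List Int) :
    ∀ (ltl : List Int) (gi : Nat) (l r : List Int),
      ((ltl.foldl (bstep gt) (gi, l, r)).2.1, (ltl.foldl (bstep gt) (gi, l, r)).2.2) =
        mergeRec (gt.drop gi) ltl l r := by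
  intro ltl
  induction ltl with
  | nil => intro gi l r; simp [mergeRec]
  | cons t ltl' ih =>
    intro gi l r
    by_cases hlen : gi < gt.length
    · have hdrop : gt.drop gi = gt[gi] :: gt.drop (gi + 1) :=
        (List.getElem_cons_drop hlen).symm
      have hgetD : gt.getD gi 0 = gt[gi] := List.getD_eq_getElem gt 0 hlen
      by_cases hle : gt[gi] ≤ t
      · have hc : gi < gt.length ∧ gt.getD gi 0 ≤ t := ⟨hlen, by rw [hgetD]; exact hle⟩
        by_cases hth : t + 1 - gt[gi] > 15
        · have hb : bstep gt (gi, l, r) t = (skipLE gt gi t, l ++ [gt[gi]], r ++ [t + 1]) := by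
            simp only [bstep, hgetD]
            rw [if_pos ⟨hlen, hle⟩, if_pos hth]
          rw [List.foldl_cons, hb, ih, skip_drop, hdrop]
          conv_rhs => rw [mergeRec]
          rw [if_pos hle, if_pos hth]
        · have hb : bstep gt (gi, l, r) t = (skipLE gt gi t, l, r) := by
            simp only [bstep, hgetD]
            rw [if_pos ⟨hlen, hle⟩, if_neg hth]
          rw [List.foldl_cons, hb, ih, skip_drop, hdrop]
          conv_rhs => rw [mergeRec]
          rw [if_pos hle, if_neg hth]
      · have hc : ¬ (gi < gt.length ∧ gt.getD gi 0 ≤ t) := by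
          rw [hgetD]; exact fun h => hle h.2
        have hb : bstep gt (gi, l, r) t = (gi, l, r) := by
          simp only [bstep]
          rw [if_neg hc]
        rw [List.foldl_cons, hb, ih, hdrop]
        conv_rhs => rw [mergeRec]
        rw [if_neg hle]
    · have hge : gt.length ≤ gi := by omega
      have hnil : gt.drop gi = [] := List.drop_eq_nil_of_le hge
      have hc : ¬ (gi < gt.length ∧ gt.getD gi 0 ≤ t) := fun h => hlen h.1
      have hb : bstep gt (gi, l, r) t = (gi, l, r) := by
        simp only [bstep]
        rw [if_neg hc]
      rw [List.foldl_cons, hb, ih, hnil]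
      conv_rhs => rw [mergeRec]

-- the enumerate/filter comprehensions compute gtOf / ltOf
theorem enum_filter_gt : ∀ (s : List Char) (i : Int),
    (((PySem.List.enumerate s i).filter (fun p => p.2 == '>')).map Prod.fst) = gtOf s i := by
  intro s
  induction s with
  | nil => intro i; simp [PySem.List.enumerate_nil, gtOf]
  | cons c s ih =>
    intro i
    by_cases hc : c = '>' <;>
      simp [PySem.List.enumerate_cons, List.filter_cons, hc, gtOf, ih]

theorem enum_filter_lt : ∀ (s : List Char) (i : Int),
    (((PySem.List.enumerate s i).filter (fun p => p.2 == '<')).map Prod.fst) = ltOf s i := by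
  intro s
  induction s with
  | nil => intro i; simp [PySem.List.enumerate_nil, ltOf]
  | cons c s ih =>
    intro i
    by_cases hc : c = '<' <;>
      simp [PySem.List.enumerate_cons, List.filter_cons, hc, ltOf, ih]

theorem sgs_length (k : List Int) : (sgs k).length = k.length - 1 := by
  simp [sgs]

theorem sgs_getElem (k : List Int) (j : Nat) (h : j < (sgs k).length) :
    (sgs k)[j] = sgn (k.getD j 0) (k.getD (j + 1) 0) := by
  have hk : j < k.length - 1 := by rw [← sgs_length k]; exact h
  have h1 : j < k.length := by omega
  have h2 : j + 1 < k.length := by omega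
  have e3 : (k.drop 1)[j]'(by simp; omega) = k[j + 1] := by
    have hq : (k.drop 1)[j]? = k[1 + j]? := List.getElem?_drop ..
    rw [show 1 + j = j + 1 from by omega] at hq
    rw [List.getElem?_eq_getElem (by simp; omega), List.getElem?_eq_getElem h2] at hq
    exact Option.some.inj hq
  simp only [sgs, List.getElem_map, List.getElem_zip]
  rw [e3, List.getD_eq_getElem k 0 h1, List.getD_eq_getElem k 0 h2]

-- one step of A's loop body is stepA on the sign character
theorem fK_eq_stepA (k : List Int) (j : Nat) (h : j < (sgs k).length)
    (acc : Int × Int × List Int × List Int × Int) :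
    fK k acc (j : Int) = stepA acc ((sgs k)[j]) (j : Int) := by
  obtain ⟨lt, rt, l, r, st⟩ := acc
  have g1 : PySem.List.pyGetD k (j : Int) 0 = k.getD j 0 := by
    rw [PySem.List.pyGetD_natCast]
  have g2 : PySem.List.pyGetD k ((j : Int) + 1) 0 = k.getD (j + 1) 0 := by
    rw [show ((j : Int) + 1) = ((j + 1 : Nat) : Int) from by push_cast; ring,
        PySem.List.pyGetD_natCast]
  rw [sgs_getElem k j h]
  rcases lt_trichotomy (k.getD j 0) (k.getD (j + 1) 0) with hab | hab | hab
  · have hs : sgn (k.getD j 0) (k.getD (j + 1) 0) = '<' := by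
      unfold sgn
      rw [if_neg (by omega), if_pos hab]
    rw [hs]
    simp only [fK, stepA, g1, g2, if_pos hab,
      if_neg (show ¬ k.getD j 0 > k.getD (j + 1) 0 from by omega),
      if_neg (show ¬ ('<' : Char) = '>' from by decide),
      if_pos (show ('<' : Char) = '<' from rfl), if_true]
  · have hs : sgn (k.getD j 0) (k.getD (j + 1) 0) = '=' := by
      unfold sgn
      rw [if_neg (by omega), if_neg (by omega)]
    rw [hs]
    simp only [fK, stepA, g1, g2,
      if_neg (show ¬ k.getD j 0 > k.getD (j + 1) 0 from by omega),
      if_neg (show ¬ k.getD j 0 < k.getD (j + 1) 0 from by omega),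
      if_neg (show ¬ ('=' : Char) = '>' from by decide),
      if_neg (show ¬ ('=' : Char) = '<' from by decide), if_true]
  · have hs : sgn (k.getD j 0) (k.getD (j + 1) 0) = '>' := by
      unfold sgn
      rw [if_pos hab]
    rw [hs]
    simp only [fK, stepA, g1, g2, if_pos hab,
      if_neg (show ¬ k.getD j 0 < k.getD (j + 1) 0 from by omega),
      if_pos (show ('>' : Char) = '>' from rfl),
      if_neg (show ¬ ('>' : Char) = '<' from by decide), if_true]

-- A's port computes runA on the sign list
theorem find_dec_eq_runA (k : List Int) :
    find_dec k = ((runA (sgs k) 0 (0, 0, [], [], 0)).2.2.1,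
                  (runA (sgs k) 0 (0, 0, [], [], 0)).2.2.2.1) := by
  have main : ∀ n (j : Nat) acc, (sgs k).length - j ≤ n → j ≤ (sgs k).length →
      (PySem.List.pyRange (j : Int) (PySem.List.len k - 1) 1).foldl (fK k) acc =
        runA ((sgs k).drop j) (j : Int) acc := by
    intro n
    induction n with
    | zero =>
      intro j acc h hle
      have hj : j = (sgs k).length := by omega
      have hnil : PySem.List.pyRange (j : Int) (PySem.List.len k - 1) 1 = [] := by
        apply PySem.List.pyRange_one_eq_nil
        have := sgs_length k
        simp only [PySem.List.len_eq]
        omega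
      rw [hnil, hj, List.drop_length]
      rfl
    | succ n ihn =>
      intro j acc h hle
      by_cases hj : j < (sgs k).length
      · have hcons : PySem.List.pyRange (j : Int) (PySem.List.len k - 1) 1 =
            (j : Int) :: PySem.List.pyRange ((j : Int) + 1) (PySem.List.len k - 1) 1 := by
          apply PySem.List.pyRange_one_cons
          have := sgs_length k
          simp only [PySem.List.len_eq]
          omega
        have hdrop : (sgs k).drop j = (sgs k)[j] :: (sgs k).drop (j + 1) :=
          (List.getElem_cons_drop hj).symm
        have hcast : ((j : Int) + 1) = ((j + 1 : Nat) : Int) := by push_cast; ring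
        rw [hcons, List.foldl_cons, hdrop]
        show (PySem.List.pyRange ((j : Int) + 1) (PySem.List.len k - 1) 1).foldl (fK k)
              (fK k acc (j : Int)) = runA ((sgs k)[j] :: (sgs k).drop (j + 1)) (j : Int) acc
        rw [fK_eq_stepA k j hj acc, hcast,
            ihn (j + 1) (stepA acc ((sgs k)[j]) (j : Int)) (by omega) (by omega)]
        rfl
      · have hj' : j = (sgs k).length := by omega
        have hnil : PySem.List.pyRange (j : Int) (PySem.List.len k - 1) 1 = [] := by
          apply PySem.List.pyRange_one_eq_nil
          have := sgs_length k
          simp only [PySem.List.len_eq]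
          omega
        rw [hnil, hj', List.drop_length]
        rfl
  have h0 : find_dec k =
      (((PySem.List.pyRange 0 (PySem.List.len k - 1) 1).foldl (fK k) (0, 0, [], [], 0)).2.2.1,
       ((PySem.List.pyRange 0 (PySem.List.len k - 1) 1).foldl (fK k) (0, 0, [], [], 0)).2.2.2.1) := rfl
  rw [h0]
  have : (PySem.List.pyRange (0 : Int) (PySem.List.len k - 1) 1).foldl (fK k) (0, 0, [], [], 0) =
      runA ((sgs k).drop 0) ((0 : Nat) : Int) (0, 0, [], [], 0) := by
    have := main ((sgs k).length) 0 (0, 0, [], [], 0) (by omega) (by omega)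
    simpa using this
  rw [List.drop_zero] at this
  simp only [Nat.cast_zero] at this
  rw [this]

-- B's port computes mergeRec on the index lists
theorem find_dec_alt_eq_mergeRec (k : List Int) :
    find_dec_alt k = mergeRec (gtOf (sgs k) 0) (ltOf (sgs k) 0) [] [] := by
  have h0 : find_dec_alt k =
      ((((ltOf (sgs k) 0).foldl (bstep (gtOf (sgs k) 0)) (0, [], [])).2.1),
       (((ltOf (sgs k) 0).foldl (bstep (gtOf (sgs k) 0)) (0, [], [])).2.2)) := by
    show ((((((PySem.List.enumerate (sgs k) 0).filter (fun p => p.2 == '<')).map Prod.fst).foldl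
            (bstep (((PySem.List.enumerate (sgs k) 0).filter (fun p => p.2 == '>')).map Prod.fst))
            (0, [], [])).2.1),
          (((((PySem.List.enumerate (sgs k) 0).filter (fun p => p.2 == '<')).map Prod.fst).foldl
            (bstep (((PySem.List.enumerate (sgs k) 0).filter (fun p => p.2 == '>')).map Prod.fst))
            (0, [], [])).2.2)) = _
    rw [enum_filter_gt, enum_filter_lt]
  rw [h0]
  have := foldl_bstep_eq_mergeRec (gtOf (sgs k) 0) (ltOf (sgs k) 0) 0 [] []
  rw [List.drop_zero] at this
  exact this

-- ===== VERDICT (by name: the statement is the Claim_ definition above) =====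
theorem find_dec_spec : Claim_equal_find_dec := by
  intro k _
  unfold Spec_find_dec
  rw [find_dec_eq_runA, find_dec_alt_eq_mergeRec]
  exact (runA_eq_mergeRec (sgs k)).1 0 0 0 [] []
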